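-- pv_equiv track=rewrite | github.com/INF1007-2021A/c03_ch4_exercices-MarcAwaad | exercice.py | get_nb_char
-- ===== SOURCE A (Python) =====
-- def get_nb_char(string: str, char: str) -> int:
--     char = "l"
--     nb_char = 0
--     for letter in string:
--         if letter == char:
--             nb_char += 1
--         elif letter == " ":
--             break
--     return nb_char
-- ===== SOURCE B (Python) =====
-- def get_nb_char(string: str, char: str) -> int:
--     # Extract the part before the first space, then count 'l' in it.
--     prefix = string.partition(" ")[0]
--     return prefix.count("l")
-- ===== Notes on version B (the rewrite author's own statement) =====
-- stated objective: faster
-- what changed: Replaces the Python-level conditional loop-with-break by extracting the prefix before the first space with str.partition and counting 'l' in it with str.count (C-level scans; the unused char parameter stays ignored, as in A).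
import Mathlib
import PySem

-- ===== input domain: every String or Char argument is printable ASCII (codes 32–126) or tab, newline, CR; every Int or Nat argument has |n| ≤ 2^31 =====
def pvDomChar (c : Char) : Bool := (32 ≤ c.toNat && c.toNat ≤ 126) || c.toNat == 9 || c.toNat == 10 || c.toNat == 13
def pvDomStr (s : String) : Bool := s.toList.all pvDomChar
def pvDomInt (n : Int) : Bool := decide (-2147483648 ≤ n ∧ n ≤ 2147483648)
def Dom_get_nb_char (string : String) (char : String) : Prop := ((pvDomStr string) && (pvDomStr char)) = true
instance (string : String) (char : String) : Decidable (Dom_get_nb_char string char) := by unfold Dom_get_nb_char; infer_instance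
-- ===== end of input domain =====

-- B replaces A's loop-with-break by extracting the prefix before the first space and counting 'l' in it (simpler decomposition).
-- ===== PORT A =====
-- the loop over string with 'break': structural recursion over the characters carrying nb_char
def getNbCharLoop : List Char → Int → Int
  | [], nb => nb
  | letter :: rest, nb =>
    if letter = 'l' then getNbCharLoop rest (nb + 1)
    else if letter = ' ' then nb
    else getNbCharLoop rest nb

def get_nb_char (string : String) (char : String) : Int :=
  getNbCharLoop string.toList 0

-- ===== PORT B =====
-- string.partition(" ")[0] = the characters before the first ' ' (exact: takeWhile on the character list);
-- prefix.count("l") for the one-character needle "l" = the count of 'l' among those characters (exact).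
def get_nb_char_alt (string : String) (char : String) : Int :=
  ((string.toList.takeWhile (fun c => c ≠ ' ')).count 'l' : Int)

-- ===== PRECONDITION & SPEC =====
def Spec_get_nb_char (string : String) (char : String) (out : Int) : Prop := out = get_nb_char_alt string char
instance (string : String) (char : String) (out : Int) : Decidable (Spec_get_nb_char string char out) := by unfold Spec_get_nb_char; infer_instance

-- ===== CLAIM (what is proved, stated in full; the proofs are below) =====
def Claim_equal_get_nb_char : Prop := ∀ (string : String) (char : String), Dom_get_nb_char string char → Spec_get_nb_char string char (get_nb_char string char)

-- ===== LEMMAS AND PROOFS =====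

-- ===== VERDICT (by name: the statement is the Claim_ definition above) =====
theorem getNbCharLoop_eq (l : List Char) (nb : Int) :
    getNbCharLoop l nb = nb + ((l.takeWhile (fun c => c ≠ ' ')).count 'l' : Int) := by
  induction l generalizing nb with
  | nil => simp [getNbCharLoop]
  | cons c rest ih =>
    by_cases hc : c = 'l'
    · simp [getNbCharLoop, hc, List.takeWhile, List.count_cons, ih]
      ring
    · by_cases hs : c = ' '
      · simp [getNbCharLoop, hc, hs, List.takeWhile]
      · simp [getNbCharLoop, hc, hs, List.takeWhile, List.count_cons, ih]

theorem get_nb_char_spec : Claim_equal_get_nb_char := by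
  intro string char _
  unfold Spec_get_nb_char get_nb_char get_nb_char_alt
  simp [getNbCharLoop_eq]
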